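-- pv_equiv track=rewrite | github.com/KhizarA77/Competitive-Programming | wk6/pikemaneasy.py | problemsSolved
-- ===== SOURCE A (Python) =====
-- def problemsSolved(times, timeLimit):
--     times.sort()
--     solved = 0
--     penalty = 0
--     time = 0
--     i = 0
--     while i < len(times):
--         if time + times[i] > timeLimit:
--             break
--         solved += 1
--         time += times[i]
--         penalty += time
--         i += 1
--
--     penalty = penalty % 1000000007
--     return (solved, penalty)
-- ===== SOURCE B (Python) =====
-- def problemsSolved(times, timeLimit):
--     times.sort()
--     solved = 0
--     total = 0
--     for t in times:
--         if total + t > timeLimit: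
--             break
--         total += t
--         solved += 1
--     penalty = 0
--     weight = solved
--     for t in times[:solved]:
--         penalty += t * weight
--         weight -= 1
--     return (solved, penalty % 1000000007)
-- ===== Notes on version B (the rewrite author's own statement) =====
-- stated objective: alternative
-- what changed: Replaces A's single loop that accumulates running prefix sums for the penalty with two separate passes: one pass finds the greedy count 'solved', a second pass computes the penalty as the positionally weighted sum sum(t_j*(solved-j)), using the identity that the sum of prefix sums equals this weighted sum.
import Mathlib
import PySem

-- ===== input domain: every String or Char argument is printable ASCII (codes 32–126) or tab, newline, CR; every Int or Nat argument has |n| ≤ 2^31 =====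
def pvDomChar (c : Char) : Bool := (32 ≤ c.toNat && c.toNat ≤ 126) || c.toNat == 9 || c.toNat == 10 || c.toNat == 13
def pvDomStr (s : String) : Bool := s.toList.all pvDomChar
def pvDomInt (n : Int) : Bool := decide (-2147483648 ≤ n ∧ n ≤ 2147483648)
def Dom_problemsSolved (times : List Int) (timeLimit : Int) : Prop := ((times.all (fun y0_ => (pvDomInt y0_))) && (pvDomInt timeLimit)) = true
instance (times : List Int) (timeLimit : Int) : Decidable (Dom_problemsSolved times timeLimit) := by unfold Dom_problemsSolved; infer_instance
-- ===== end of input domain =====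

-- B computes the same (solved, penalty) in two separate passes (greedy count, then a
-- positionally weighted sum) instead of A's single loop accumulating prefix sums.
-- Both Pythons sort `times` in place; the equivalence proved here is about the return value.

-- ===== PORT A =====
-- A's while loop over the sorted list with state (solved, penalty, time), breaking
-- when time + t > timeLimit.
def pvLoopA (l : List Int) (solved penalty time timeLimit : Int) : Int × Int :=
  match l with
  | [] => (solved, penalty)
  | t :: rest =>
    if time + t > timeLimit then (solved, penalty)
    else pvLoopA rest (solved + 1) (penalty + (time + t)) (time + t) timeLimit

def problemsSolved (times : List Int) (timeLimit : Int) : Int × Int :=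
  let ts := PySem.List.sorted times (fun x => x) false
  let (solved, penalty) := pvLoopA ts 0 0 0 timeLimit
  (solved, PySem.Int.mod penalty 1000000007)

-- ===== PORT B =====
-- B's first pass: greedy count with a running total.
def pvCount (l : List Int) (total timeLimit : Int) : Int :=
  match l with
  | [] => 0
  | t :: rest =>
    if total + t > timeLimit then 0
    else 1 + pvCount rest (total + t) timeLimit

-- B's second pass: penalty += t * weight; weight -= 1 over times[:solved].
def pvWeighted (l : List Int) (penalty weight : Int) : Int :=
  match l with
  | [] => penalty
  | t :: rest => pvWeighted rest (penalty + t * weight) (weight - 1)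

def problemsSolved_alt (times : List Int) (timeLimit : Int) : Int × Int :=
  let ts := PySem.List.sorted times (fun x => x) false
  let solved := pvCount ts 0 timeLimit
  let penalty := pvWeighted (PySem.List.slice ts none (some solved)) 0 solved
  (solved, PySem.Int.mod penalty 1000000007)

-- ===== PRECONDITION & SPEC =====
def Spec_problemsSolved (times : List Int) (timeLimit : Int) (out : Int × Int) : Prop := out = problemsSolved_alt times timeLimit
instance (times : List Int) (timeLimit : Int) (out : Int × Int) : Decidable (Spec_problemsSolved times timeLimit out) := by unfold Spec_problemsSolved; infer_instance

-- ===== CLAIM (what is proved, stated in full; the proofs are below) =====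
def Claim_equal_problemsSolved : Prop := ∀ (times : List Int) (timeLimit : Int), Dom_problemsSolved times timeLimit → Spec_problemsSolved times timeLimit (problemsSolved times timeLimit)

-- ===== LEMMAS AND PROOFS =====

-- pvCount is nonnegative.
theorem pvCount_nonneg (l : List Int) (total timeLimit : Int) : 0 ≤ pvCount l total timeLimit := by
  induction l generalizing total with
  | nil => simp [pvCount]
  | cons t rest ih =>
    simp only [pvCount]
    split
    · omega
    · have := ih (total + t); omega

-- pvWeighted with accumulator pulled out.
theorem pvWeighted_acc (l : List Int) (penalty weight : Int) :
    pvWeighted l penalty weight = penalty + pvWeighted l 0 weight := by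
  induction l generalizing penalty weight with
  | nil => simp [pvWeighted]
  | cons t rest ih =>
    simp only [pvWeighted]
    rw [ih (penalty + t * weight), ih (0 + t * weight)]
    ring

-- Core invariant: A's loop equals (solved + count, penalty + count*time + weighted sum
-- of the first count elements with weights count, count-1, …, 1).
theorem pvLoopA_eq (l : List Int) (solved penalty time timeLimit : Int) :
    pvLoopA l solved penalty time timeLimit =
      (solved + pvCount l time timeLimit,
       penalty + (pvCount l time timeLimit) * time +
         pvWeighted (l.take (pvCount l time timeLimit).toNat) 0 (pvCount l time timeLimit)) := by
  induction l generalizing solved penalty time with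
  | nil => simp [pvLoopA, pvCount, pvWeighted]
  | cons t rest ih =>
    by_cases h : time + t > timeLimit
    · simp [pvLoopA, pvCount, h, pvWeighted]
    · have hc := pvCount_nonneg rest (time + t) timeLimit
      simp only [pvLoopA, pvCount, if_neg h]
      rw [ih]
      have htn : (1 + pvCount rest (time + t) timeLimit).toNat
          = (pvCount rest (time + t) timeLimit).toNat + 1 := by omega
      rw [htn]
      simp only [List.take_succ_cons, pvWeighted]
      rw [pvWeighted_acc (rest.take _) (0 + t * (1 + pvCount rest (time + t) timeLimit))]
      have harg : (1 + pvCount rest (time + t) timeLimit) - 1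
          = pvCount rest (time + t) timeLimit := by ring
      rw [harg, Prod.mk.injEq]
      exact ⟨by ring, by ring⟩

-- slice ts none (some n) = take n.toNat for 0 ≤ n.
theorem slice_to_take (ts : List Int) (n : Int) (h : 0 ≤ n) :
    PySem.List.slice ts none (some n) = ts.take n.toNat := by
  exact PySem.List.slice_to ts h

-- ===== VERDICT (by name: the statement is the Claim_ definition above) =====
theorem problemsSolved_spec : Claim_equal_problemsSolved := by
  intro times timeLimit _
  unfold Spec_problemsSolved problemsSolved problemsSolved_alt
  have hc := pvCount_nonneg (PySem.List.sorted times (fun x => x) false) 0 timeLimit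
  simp only [pvLoopA_eq, slice_to_take _ _ hc]
  simp
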